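-- pv_equiv track=rewrite | github.com/418704194/Course | message-in-DNA/CountText4.py | Clump
-- ===== SOURCE A (Python) =====
-- def Clump(text,kmer,num):
--     patter = {}
--     for i in range(0,len(text)-kmer+1) :
--         pat = text[i:(i+kmer)]
--         if pat in patter :
--             patter[pat] = patter[pat] + 1
--         else :
--             patter[pat] = 1
--
--     Mseq = []
--     for key in patter:
--         if patter[key] == num:
--             Mseq.append(key)
--     return(Mseq)
-- ===== SOURCE B (Python) =====
-- def Clump(text, kmer, num):
--     n = len(text) - kmer + 1
--     out = []
--     for i in range(n):
--         pat = text[i:i+kmer]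
--         if any(text[j:j+kmer] == pat for j in range(i)):
--             continue  # not the first occurrence of this k-mer
--         if sum(1 for j in range(n) if text[j:j+kmer] == pat) == num:
--             out.append(pat)
--     return out
-- ===== Notes on version B (the rewrite author's own statement) =====
-- stated objective: alternative
-- what changed: A builds a count dictionary in one pass and then collects keys whose count is num; B uses no dictionary or table at all: it works at the index level, skipping each position whose k-mer already occurred at an earlier position (inner backward scan) and counting the surviving k-mer by a full positional scan, appending it when the count equals num.
import Mathlib
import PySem

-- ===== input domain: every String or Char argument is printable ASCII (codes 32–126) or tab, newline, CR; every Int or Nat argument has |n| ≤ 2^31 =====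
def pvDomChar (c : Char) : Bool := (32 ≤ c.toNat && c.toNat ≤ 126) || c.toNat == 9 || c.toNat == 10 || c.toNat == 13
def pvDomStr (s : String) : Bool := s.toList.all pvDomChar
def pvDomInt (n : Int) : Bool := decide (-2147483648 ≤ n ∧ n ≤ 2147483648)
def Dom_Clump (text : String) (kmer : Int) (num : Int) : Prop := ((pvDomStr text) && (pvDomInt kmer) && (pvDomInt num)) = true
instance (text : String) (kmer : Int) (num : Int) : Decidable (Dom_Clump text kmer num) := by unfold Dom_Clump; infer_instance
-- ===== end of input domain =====

-- B replaces A's count-dictionary pass by index-level brute force: for each position it skips non-first occurrences (scan of earlier positions) and counts matches by scanning all positions — no dictionary or count table; same return value.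


-- ===== PORT A =====
def Clump (text : String) (kmer : Int) (num : Int) : List String :=
  let patter : PySem.Dict String Int :=
    (PySem.List.pyRange 0 (PySem.Str.len text - kmer + 1) 1).foldl
      (fun d i =>
        let pat := PySem.Str.slice text (some i) (some (i + kmer))
        if d.contains pat then d.insert pat (d.getD pat 0 + 1) else d.insert pat 1)
      PySem.Dict.empty
  patter.keys.foldl
    (fun acc key => if patter.getD key 0 == num then acc ++ [key] else acc) []

-- ===== PORT B =====
-- helper: the generator 'any(text[j:j+kmer] == pat for j in range(i))' — scans j = 0..i-1 with early exit, as Python's any does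
def clumpSeenBefore (text : String) (kmer : Int) (pat : String) (i j : Int) : Bool :=
  if j < i then
    if PySem.Str.slice text (some j) (some (j + kmer)) == pat then true
    else clumpSeenBefore text kmer pat i (j + 1)
  else false
termination_by (i - j).toNat
decreasing_by omega

def Clump_alt (text : String) (kmer : Int) (num : Int) : List String :=
  let n := PySem.Str.len text - kmer + 1
  (PySem.List.pyRange 0 n 1).foldl
    (fun out i =>
      let pat := PySem.Str.slice text (some i) (some (i + kmer))
      if clumpSeenBefore text kmer pat i 0 then out
      else if (((PySem.List.pyRange 0 n 1).countP
          (fun j => PySem.Str.slice text (some j) (some (j + kmer)) == pat) : Int) == num) then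
        out ++ [pat]
      else out)
    []

-- ===== PRECONDITION & SPEC =====
def Spec_Clump (text : String) (kmer : Int) (num : Int) (out : List String) : Prop := out = Clump_alt text kmer num
instance (text : String) (kmer : Int) (num : Int) (out : List String) : Decidable (Spec_Clump text kmer num out) := by unfold Spec_Clump; infer_instance

-- ===== CLAIM (what is proved, stated in full; the proofs are below) =====
def Claim_equal_Clump : Prop := ∀ (text : String) (kmer : Int) (num : Int), Dom_Clump text kmer num → Spec_Clump text kmer num (Clump text kmer num)

-- ===== LEMMAS AND PROOFS =====

-- the short-circuit scan equals any over the index range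
theorem clumpSeenBefore_eq (text : String) (kmer : Int) (pat : String) : ∀ (i j : Int),
    clumpSeenBefore text kmer pat i j
      = (PySem.List.pyRange j i 1).any
          (fun x => PySem.Str.slice text (some x) (some (x + kmer)) == pat) := by
  intro i j
  rw [clumpSeenBefore]
  by_cases h : j < i
  · rw [if_pos h, PySem.List.pyRange_one_cons h, List.any_cons,
        clumpSeenBefore_eq text kmer pat i (j + 1)]
    by_cases hs : (PySem.Str.slice text (some j) (some (j + kmer)) == pat) = true
    · simp [hs]
    · simp [Bool.not_eq_true] at hs
      simp [hs]
  · rw [if_neg h, PySem.List.pyRange_one_eq_nil (by omega)]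
    simp
termination_by i j => (i - j).toNat
decreasing_by omega

-- A's counting-loop step is the Counter step once the redundant contains-branch is merged.
theorem clump_step_eq (d : PySem.Dict String Int) (x : String) :
    (if d.contains x then d.insert x (d.getD x 0 + 1) else d.insert x 1)
      = d.insert x (d.getD x 0 + 1) := by
  by_cases h : d.contains x
  · simp [h]
  · have h0 : d.getD x 0 = 0 := by
      rw [PySem.Dict.contains_eq_isSome_get?] at h
      rw [PySem.Dict.getD_eq_get?_getD]
      cases hg : d.get? x with
      | none => rfl
      | some v => rw [hg] at h; simp at h
    simp [h, h0]

-- A equals the canonical form: ordered dedup of the k-mer list, filtered by total count.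
theorem clumpA_canon (xs : List String) (num : Int) :
    (xs.foldl
        (fun (d : PySem.Dict String Int) pat =>
          if d.contains pat then d.insert pat (d.getD pat 0 + 1) else d.insert pat 1)
        PySem.Dict.empty).keys.foldl
      (fun acc key =>
        if (xs.foldl
            (fun d pat => if d.contains pat then d.insert pat (d.getD pat 0 + 1) else d.insert pat 1)
            PySem.Dict.empty).getD key 0 == num then acc ++ [key] else acc) []
      = (PySem.Set.ofList xs).filter (fun k => ((xs.count k : Int) == num)) := by
  have hd : xs.foldl
      (fun d pat => if d.contains pat then d.insert pat (d.getD pat 0 + 1) else d.insert pat 1)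
      PySem.Dict.empty = PySem.Dict.counter xs := by
    rw [show (fun (d : PySem.Dict String Int) (pat : String) =>
          if d.contains pat then d.insert pat (d.getD pat 0 + 1) else d.insert pat 1)
        = fun d pat => d.insert pat (d.getD pat 0 + 1) from
          funext fun d => funext fun pat => clump_step_eq d pat]
    exact PySem.Dict.foldl_insert_getD_add_one_eq_counter xs
  rw [PySem.List.foldl_append_if_eq_filter, List.nil_append, hd, PySem.Dict.keys_counter]
  exact List.filter_congr fun x _ => by rw [PySem.Dict.getD_counter]

-- B's scan over the first m positions builds the filtered dedup of the first m k-mers.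
theorem clumpB_invariant (g : Nat → String) (n : Nat) (num : Int) (m : Nat) :
    (List.range m).foldl
      (fun (out : List String) (k : Nat) =>
        if ((List.range k).map g).contains (g k) then out
        else if ((((List.range n).map g).count (g k) : Int) == num) then out ++ [g k]
        else out) []
      = (PySem.Set.ofList ((List.range m).map g)).filter
          (fun p => ((((List.range n).map g).count p : Int) == num)) := by
  induction m with
  | zero => simp [PySem.Set.ofList]
  | succ m ih =>
    rw [List.range_succ, List.foldl_append, ih, List.map_append, List.map_singleton,
        PySem.Set.ofList_append_singleton]
    simp only [List.foldl_cons, List.foldl_nil]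
    by_cases hmem : g m ∈ (List.range m).map g
    · have hc : ((List.range m).map g).contains (g m) = true := by simpa using hmem
      have hadd : PySem.Set.add (PySem.Set.ofList ((List.range m).map g)) (g m)
          = PySem.Set.ofList ((List.range m).map g) :=
        PySem.Set.add_of_mem ((PySem.Set.mem_ofList _ _).mpr hmem)
      rw [hc, hadd]; simp
    · have hc : ((List.range m).map g).contains (g m) = false := by simpa using hmem
      have hadd : PySem.Set.add (PySem.Set.ofList ((List.range m).map g)) (g m)
          = PySem.Set.ofList ((List.range m).map g) ++ [g m] :=
        PySem.Set.add_of_not_mem (fun h => hmem ((PySem.Set.mem_ofList _ _).mp h))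
      rw [hc, hadd, List.filter_append]
      simp only [List.filter_cons, List.filter_nil]
      by_cases hnum : ((((List.range n).map g).count (g m) : Int) == num) = true
      · rw [hnum]; simp
      · rw [Bool.not_eq_true] at hnum; simp [hnum]

-- ===== VERDICT (by name: the statement is the Claim_ definition above) =====
theorem Clump_spec : Claim_equal_Clump := by
  intro text kmer num _
  unfold Spec_Clump Clump Clump_alt
  set f : Int → String := fun i => PySem.Str.slice text (some i) (some (i + kmer)) with hf
  set N : Int := PySem.Str.len text - kmer + 1 with hN
  set g : Nat → String := fun k => f (k : Int) with hg
  have hrange : ∀ b : Int, PySem.List.pyRange 0 b 1 = (List.range b.toNat).map (fun k : Nat => (k : Int)) := by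
    intro b
    rw [PySem.List.pyRange_one]
    simp
  have hxs : (PySem.List.pyRange 0 N 1).map f = (List.range N.toNat).map g := by
    rw [hrange, List.map_map];
    rfl
  -- A side to canonical form
  have hA :
      ((PySem.List.pyRange 0 N 1).foldl
        (fun (d : PySem.Dict String Int) i =>
          if d.contains (f i) then d.insert (f i) (d.getD (f i) 0 + 1) else d.insert (f i) 1)
        PySem.Dict.empty).keys.foldl
        (fun acc key =>
          if ((PySem.List.pyRange 0 N 1).foldl
              (fun (d : PySem.Dict String Int) i =>
                if d.contains (f i) then d.insert (f i) (d.getD (f i) 0 + 1) else d.insert (f i) 1)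
              PySem.Dict.empty).getD key 0 == num then acc ++ [key] else acc) []
      = (PySem.Set.ofList ((List.range N.toNat).map g)).filter
          (fun k => ((((List.range N.toNat).map g).count k : Int) == num)) := by
    have h1 : ∀ (d0 : PySem.Dict String Int),
        (PySem.List.pyRange 0 N 1).foldl
          (fun (d : PySem.Dict String Int) i =>
            if d.contains (f i) then d.insert (f i) (d.getD (f i) 0 + 1) else d.insert (f i) 1) d0
        = ((PySem.List.pyRange 0 N 1).map f).foldl
          (fun d pat => if d.contains pat then d.insert pat (d.getD pat 0 + 1) else d.insert pat 1) d0 := by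
      intro d0; rw [List.foldl_map]
    simp only [h1, hxs]
    exact clumpA_canon _ num
  -- B side via the invariant
  have hstep : ∀ (out : List String) (k : Nat),
      (if clumpSeenBefore text kmer (f (k : Int)) (k : Int) 0 then out
       else if ((((List.range N.toNat).map (fun k : Nat => (k : Int))).countP (fun j => f j == f (k : Int)) : Int) == num) then
         out ++ [f (k : Int)]
       else out)
      = (if ((List.range k).map g).contains (g k) then out
         else if ((((List.range N.toNat).map g).count (g k) : Int) == num) then out ++ [g k]
         else out) := by
    intro out k
    have e1 : clumpSeenBefore text kmer (f (k : Int)) (k : Int) 0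
        = ((List.range k).map g).contains (g k) := by
      rw [clumpSeenBefore_eq, hrange (k : Int), List.any_map, List.contains_eq_any_beq, List.any_map]
      simp only [Int.toNat_natCast]
      congr 1
      funext j
      show (f (j : Int) == f (k : Int)) = (g k == g j)
      exact Bool.beq_comm
    have e2 : (((List.range N.toNat).map (fun k : Nat => (k : Int))).countP (fun j => f j == f (k : Int)))
        = ((List.range N.toNat).map g).count (g k) := by
      rw [List.countP_map, List.count_eq_countP, List.countP_map]
      rfl
    rw [e1, e2]
  have hB :
      (PySem.List.pyRange 0 N 1).foldl
        (fun out i =>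
          if clumpSeenBefore text kmer (f i) i 0 then out
          else if (((PySem.List.pyRange 0 N 1).countP (fun j => f j == f i) : Int) == num) then
            out ++ [f i]
          else out) []
      = (PySem.Set.ofList ((List.range N.toNat).map g)).filter
          (fun k => ((((List.range N.toNat).map g).count k : Int) == num)) := by
    rw [hrange N, List.foldl_map]
    simp only [hstep]
    exact clumpB_invariant g N.toNat num N.toNat
  rw [hA, hB]
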